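-- pv_equiv track=rewrite | github.com/KZJericho/Repeat_Expansion_Tests_Research | HD_Test_Main.py | find_best_pattern
-- ===== SOURCE A (Python) =====
-- def hash_mul31(s):
--     result = ord(s[0])
--     for i in range(1, len(s)):
--         result = result*31+ord(s[i])
--     return result
--
-- def find_best_pattern(pat, s):
--
--     pattern_length = len(pat)
--     pattern_hash = hash_mul31(pat)
--
--     best_length = 0
--     current_best_location = None
--
--     current_length = 0
--     current_location = None
--
--     i = 0
--     #rolling hash
--     while i < (len(s)):
--
--         current_chunk = s[i:i+pattern_length]
--         current_hash = hash_mul31(current_chunk)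
--         if current_hash == pattern_hash and s[i:i+pattern_length] == pat:
--                 current_length += 1
--                 current_location = i
--
--                 i += len(pat)
--
--         #record best lengths
--         else:
--             if current_length > best_length:
--                 best_length = current_length
--                 current_best_location = current_location - (len(pat))*((current_length)-1)
--
--             current_length = 0
--             i += 1
--
--     if current_length > best_length:
--         best_length = current_length
--         current_best_location = current_location - (len(pat))*((current_length)-1)
--
--
--     return (best_length, current_best_location)
-- ===== SOURCE B (Python) =====
-- def find_best_pattern(pat, s):
--     # Jump between pattern occurrences with str.find instead of hashing an
--     # L-char chunk at every position; same greedy run counting, same result.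
--     L = len(pat)
--     best_length = 0
--     best_location = None
--     i = 0
--     while True:
--         j = s.find(pat, i)
--         if j == -1:
--             return (best_length, best_location)
--         run = 1
--         k = j + L
--         while s[k:k+L] == pat:
--             run += 1
--             k += L
--         if run > best_length:
--             best_length = run
--             best_location = j
--         i = k + 1
-- ===== Notes on version B (the rewrite author's own statement) =====
-- stated objective: faster
-- what changed: Replaces the per-position 31-multiplier chunk hashing (A recomputes a full L-character hash at every index) with str.find jumps between occurrences plus direct slice comparison for the run extension, keeping the identical greedy run accounting.
import Mathlib
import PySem

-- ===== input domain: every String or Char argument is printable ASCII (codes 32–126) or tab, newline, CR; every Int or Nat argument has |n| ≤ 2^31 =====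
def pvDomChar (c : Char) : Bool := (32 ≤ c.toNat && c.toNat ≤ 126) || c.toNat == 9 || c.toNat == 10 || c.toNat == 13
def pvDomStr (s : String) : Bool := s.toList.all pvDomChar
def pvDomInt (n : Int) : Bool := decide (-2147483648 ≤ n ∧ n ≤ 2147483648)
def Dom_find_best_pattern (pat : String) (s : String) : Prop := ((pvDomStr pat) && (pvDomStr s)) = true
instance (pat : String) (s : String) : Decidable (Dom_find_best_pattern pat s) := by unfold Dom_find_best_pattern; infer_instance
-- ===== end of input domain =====

-- B replaces A's per-position mul-31 chunk hashing by find-style jumps between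
-- occurrences plus direct slice comparison for run extension (objective: faster).

-- ===== PORT A =====

-- hash_mul31(s): ord(s[0]) then result*31+ord(s[i]); Python raises IndexError on "",
-- which Pre_ excludes (the [] arm is unreachable there).
def pvHash (l : List Char) : Int :=
  match l with
  | [] => 0
  | c :: rest => rest.foldl (fun r ch => r * 31 + (ch.toNat : Int)) (c.toNat : Int)

-- A's while loop, state (best_length, current_best_location, current_length,
-- current_location, i); the chunk s[i:i+L] is (drop i).take L
-- (= PySem.List.slice_natCast_add).  current_location is read only when
-- current_length > 0, where it is `some _` (cloc.getD 0 is exact on every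
-- reachable state).
def loopA (p cs : List Char) (hp : p ≠ []) (ph : Int) (best : Int) (bloc : Option Int)
    (cur : Int) (cloc : Option Int) (i : Nat) : List (Option Int) :=
  if h : i < cs.length then
    if pvHash ((cs.drop i).take p.length) == ph && ((cs.drop i).take p.length) == p then
      loopA p cs hp ph best bloc (cur + 1) (some (i : Int)) (i + p.length)
    else
      if cur > best then
        loopA p cs hp ph cur (some (cloc.getD 0 - (p.length : Int) * (cur - 1))) 0 none (i + 1)
      else
        loopA p cs hp ph best bloc 0 none (i + 1)
  else
    if cur > best then [some cur, some (cloc.getD 0 - (p.length : Int) * (cur - 1))]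
    else [some best, bloc]
termination_by cs.length - i
decreasing_by
  · have := List.length_pos_iff.mpr hp; omega
  · omega
  · omega

def find_best_pattern (pat : String) (s : String) : List (Option Int) :=
  if hp : pat.toList = [] then [some 0, none]  -- hash_mul31(pat) raises IndexError; outside Pre_
  else loopA pat.toList s.toList hp (pvHash pat.toList) 0 none 0 none 0

-- ===== PORT B =====

-- a full match of p at k forces k < cs.length (used for termination of the B loops)
theorem pvMatch_lt {p cs : List Char} (hp : p ≠ []) {k : Nat}
    (h : (cs.drop k).take p.length = p) : k < cs.length := by
  by_contra hk
  rw [List.drop_eq_nil_of_le (by omega)] at h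
  simp at h
  exact hp h

-- s.find(pat, i): smallest j ≥ i where pat matches, none for -1
def pvFindFrom (p cs : List Char) (i : Nat) : Option Nat :=
  if h : i < cs.length then
    if (cs.drop i).take p.length = p then some i else pvFindFrom p cs (i + 1)
  else none
termination_by cs.length - i

theorem pvFindFrom_some {p cs : List Char} {i j : Nat}
    (h : pvFindFrom p cs i = some j) : i ≤ j ∧ j < cs.length := by
  fun_induction pvFindFrom p cs i with
  | case1 i hlt hm => simp at h; omega
  | case2 i hlt hm ih => have := ih h; omega
  | case3 i hlt => simp at h

-- Source B's inner `while s[k:k+L] == pat` counter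
def pvRun (p cs : List Char) (hp : p ≠ []) (k : Nat) : Nat :=
  if (cs.drop k).take p.length = p then 1 + pvRun p cs hp (k + p.length) else 0
termination_by cs.length - k
decreasing_by
  have h1 := pvMatch_lt hp (by assumption)
  have h2 := List.length_pos_iff.mpr hp
  omega

-- Source B's outer loop: jump to the next occurrence, count the run, record, resume
-- one position past the end of the run (run = 1 + pvRun, final k = j + L*run)
def loopB (p cs : List Char) (hp : p ≠ []) (best : Int) (bloc : Option Int) (i : Nat) :
    List (Option Int) :=
  match hf : pvFindFrom p cs i with
  | none => [some best, bloc]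
  | some j =>
    if (1 + (pvRun p cs hp (j + p.length) : Int)) > best then
      loopB p cs hp (1 + (pvRun p cs hp (j + p.length) : Int)) (some (j : Int))
        (j + p.length * (1 + pvRun p cs hp (j + p.length)) + 1)
    else
      loopB p cs hp best bloc (j + p.length * (1 + pvRun p cs hp (j + p.length)) + 1)
termination_by cs.length - i
decreasing_by
  all_goals
    have h1 := pvFindFrom_some hf
    have h2 := List.length_pos_iff.mpr hp
    omega

def find_best_pattern_alt (pat : String) (s : String) : List (Option Int) :=
  if hp : pat.toList = [] then [some 0, none]  -- Source B never returns here; outside Pre_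
  else loopB pat.toList s.toList hp 0 none 0

-- ===== PRECONDITION & SPEC =====
-- A raises IndexError (hash_mul31 reads pat[0]) whenever pat is empty; excluded.
def Pre_find_best_pattern (pat : String) (s : String) : Prop := pat ≠ ""
instance (pat : String) (s : String) : Decidable (Pre_find_best_pattern pat s) := by
  unfold Pre_find_best_pattern; infer_instance

def pvWitness_find_best_pattern : String × String := ("ab", "xababab yab")

def Spec_find_best_pattern (pat : String) (s : String) (out : List (Option Int)) : Prop := out = find_best_pattern_alt pat s
instance (pat : String) (s : String) (out : List (Option Int)) : Decidable (Spec_find_best_pattern pat s out) := by unfold Spec_find_best_pattern; infer_instance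

-- ===== CLAIM (what is proved, stated in full; the proofs are below) =====
def Claim_equal_find_best_pattern : Prop := ∀ (pat : String) (s : String), Dom_find_best_pattern pat s → Pre_find_best_pattern pat s → Spec_find_best_pattern pat s (find_best_pattern pat s)

-- ===== LEMMAS AND PROOFS =====

-- the hash test is redundant given the slice comparison A also performs
theorem pvCondA_pos (p chunk : List Char) (hc : chunk = p) :
    (pvHash chunk == pvHash p && chunk == p) = true := by subst hc; simp
theorem pvCondA_neg (p chunk : List Char) (hc : chunk ≠ p) :
    (pvHash chunk == pvHash p && chunk == p) = false := by simp [hc]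

theorem pvFindFrom_none (p cs : List Char) {i : Nat} (h : ¬ i < cs.length) :
    pvFindFrom p cs i = none := by
  rw [pvFindFrom, dif_neg h]

theorem loopB_none (p cs : List Char) (hp : p ≠ []) {i : Nat}
    (h : pvFindFrom p cs i = none) (best : Int) (bloc : Option Int) :
    loopB p cs hp best bloc i = [some best, bloc] := by
  conv_lhs => rw [loopB]
  split
  · rfl
  · rename_i j heq; rw [h] at heq; exact absurd heq (by simp)

theorem loopB_some (p cs : List Char) (hp : p ≠ []) {i j : Nat}
    (h : pvFindFrom p cs i = some j) (best : Int) (bloc : Option Int) :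
    loopB p cs hp best bloc i =
      if (1 + (pvRun p cs hp (j + p.length) : Int)) > best then
        loopB p cs hp (1 + (pvRun p cs hp (j + p.length) : Int)) (some (j : Int))
          (j + p.length * (1 + pvRun p cs hp (j + p.length)) + 1)
      else
        loopB p cs hp best bloc (j + p.length * (1 + pvRun p cs hp (j + p.length)) + 1) := by
  conv_lhs => rw [loopB]
  split
  · rename_i heq; rw [h] at heq; exact absurd heq (by simp)
  · rename_i j' heq
    rw [h] at heq
    obtain rfl : j' = j := by simpa using heq.symm
    rfl

-- the position right after Source B's inner while loop carries no match
theorem pvRun_no_match (p cs : List Char) (hp : p ≠ []) (k : Nat) :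
    (cs.drop (k + p.length * pvRun p cs hp k)).take p.length ≠ p := by
  fun_induction pvRun p cs hp k with
  | case1 k hm ih =>
      rw [show k + p.length * (1 + pvRun p cs hp (k + p.length))
            = (k + p.length) + p.length * pvRun p cs hp (k + p.length) from by ring]
      exact ih
  | case2 k hm => simpa using hm

-- an accepted run of 1 + pvRun copies starting at a match j advances A's state in one block
theorem loopA_run (p cs : List Char) (hp : p ≠ []) (best : Int) (bloc : Option Int)
    (cur : Int) (cloc : Option Int) (j : Nat)
    (hm : (cs.drop j).take p.length = p) :
    loopA p cs hp (pvHash p) best bloc cur cloc j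
      = loopA p cs hp (pvHash p) best bloc (cur + (1 + (pvRun p cs hp (j + p.length) : Int)))
          (some ((j : Int) + (p.length : Int) * (pvRun p cs hp (j + p.length))))
          (j + p.length * (1 + pvRun p cs hp (j + p.length))) := by
  have hL : 0 < p.length := List.length_pos_iff.mpr hp
  generalize hr : pvRun p cs hp (j + p.length) = r
  induction r generalizing j cur cloc with
  | zero =>
      have hj := pvMatch_lt hp hm
      conv_lhs => rw [loopA]
      rw [dif_pos hj, pvCondA_pos p _ hm, if_pos rfl]
      norm_num
  | succ r ih =>
      have hj := pvMatch_lt hp hm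
      by_cases hm2 : (cs.drop (j + p.length)).take p.length = p
      · have hr2 : pvRun p cs hp ((j + p.length) + p.length) = r := by
          rw [pvRun, if_pos hm2] at hr; omega
        conv_lhs => rw [loopA]
        rw [dif_pos hj, pvCondA_pos p _ hm, if_pos rfl]
        rw [ih _ _ _ hm2 hr2]
        congr 1
        · push_cast; ring
        · push_cast; ring
        · ring
      · rw [pvRun, if_neg hm2] at hr; omega

theorem loopA_eq_loopB (p cs : List Char) (hp : p ≠ []) :
    ∀ (N i : Nat) (best : Int) (bloc : Option Int), cs.length - i ≤ N → 0 ≤ best →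
      loopA p cs hp (pvHash p) best bloc 0 none i = loopB p cs hp best bloc i := by
  have hL : 0 < p.length := List.length_pos_iff.mpr hp
  intro N
  induction N with
  | zero =>
      intro i best bloc hNi hbest
      have h : ¬ i < cs.length := by omega
      conv_lhs => rw [loopA]
      rw [dif_neg h, if_neg (by omega), loopB_none p cs hp (pvFindFrom_none p cs h)]
  | succ N ih =>
      intro i best bloc hNi hbest
      by_cases h : i < cs.length
      · by_cases hm : (cs.drop i).take p.length = p
        · -- a run starts at i
          have hfind : pvFindFrom p cs i = some i := by
            rw [pvFindFrom, dif_pos h, if_pos hm]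
          rw [loopA_run p cs hp best bloc 0 none i hm,
              loopB_some p cs hp hfind best bloc]
          have hnm : (cs.drop (i + p.length * (1 + pvRun p cs hp (i + p.length)))).take p.length ≠ p := by
            have h0 := pvRun_no_match p cs hp (i + p.length)
            rw [show (i + p.length) + p.length * pvRun p cs hp (i + p.length)
                  = i + p.length * (1 + pvRun p cs hp (i + p.length)) from by ring] at h0
            exact h0
          conv_lhs => rw [loopA]
          rw [show (0 : Int) + (1 + (pvRun p cs hp (i + p.length) : Int))
                = 1 + (pvRun p cs hp (i + p.length) : Int) from by ring]
          simp only [Option.getD_some]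
          rw [show ((i : Int) + (p.length : Int) * (pvRun p cs hp (i + p.length))
                  - (p.length : Int) * (1 + (pvRun p cs hp (i + p.length) : Int) - 1)) = (i : Int)
              from by ring]
          by_cases hk : i + p.length * (1 + pvRun p cs hp (i + p.length)) < cs.length
          · rw [dif_pos hk, pvCondA_neg p _ hnm, if_neg Bool.false_ne_true]
            by_cases hgt : (1 + (pvRun p cs hp (i + p.length) : Int)) > best
            · rw [if_pos hgt, if_pos hgt]
              exact ih _ _ _ (by omega) (by positivity)
            · rw [if_neg hgt, if_neg hgt]
              exact ih _ _ _ (by omega) hbest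
          · rw [dif_neg hk]
            have hfn := pvFindFrom_none p cs
              (i := i + p.length * (1 + pvRun p cs hp (i + p.length)) + 1) (by omega)
            rw [loopB_none p cs hp hfn, loopB_none p cs hp hfn]
        · -- no match at i: both sides shift to i + 1
          have hshift : pvFindFrom p cs i = pvFindFrom p cs (i + 1) := by
            rw [pvFindFrom, dif_pos h, if_neg hm]
          conv_lhs => rw [loopA]
          rw [dif_pos h, pvCondA_neg p _ hm, if_neg Bool.false_ne_true, if_neg (by omega),
              ih (i + 1) best bloc (by omega) hbest]
          cases hf2 : pvFindFrom p cs (i + 1) with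
          | none => rw [loopB_none p cs hp hf2, loopB_none p cs hp (hshift.trans hf2)]
          | some j => rw [loopB_some p cs hp hf2, loopB_some p cs hp (hshift.trans hf2)]
      · conv_lhs => rw [loopA]
        rw [dif_neg h, if_neg (by omega), loopB_none p cs hp (pvFindFrom_none p cs h)]

-- ===== VERDICT (by name: the statement is the Claim_ definition above) =====
theorem find_best_pattern_spec : Claim_equal_find_best_pattern := by
  intro pat s _ hpre
  have hp : pat.toList ≠ [] := by
    intro h
    exact hpre (String.toList_eq_nil_iff.mp h)
  unfold Spec_find_best_pattern find_best_pattern find_best_pattern_alt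
  rw [dif_neg hp, dif_neg hp]
  exact loopA_eq_loopB _ _ hp s.toList.length 0 0 none (by omega) le_rfl
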